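-- pv_equiv track=rewrite | github.com/manwar/perlweeklychallenge-club | challenge-311/sgreen/python/ch-2.py | group_digit_sum
-- ===== SOURCE A (Python) =====
-- def group_digit_sum(s: str, i: int) -> int:
--     """Calculate the sum of each group of "i" character concatenated until such
--     point that the sum if "i" digits or less.
--
--     Args:
--         s (str): The string
--         i (int): The size of each group
--
--     Returns:
--         int: The sum of each group of strings
--     """
--
--     # Group the input into 'i' characters
--     groups = [s[x:x+i] for x in range(0, len(s), i)]
--
--     # Sum each group of digits
--     sums = ''
--     for group in groups:
--         sums += str(sum(int(d) for d in group))
--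
--     # If the new sum is longer than i digits, call the function again
--     if len(sums) > i:
--         return group_digit_sum(sums, i)
--
--     # Return the sum as an integer
--     return int(sums)
-- ===== SOURCE B (Python) =====
-- def group_digit_sum(s: str, i: int) -> int:
--     """Iterative version: single left-to-right scan per pass with a running
--     group sum and counter (no slicing), looping until the result fits i digits."""
--     while True:
--         parts = []
--         acc = 0
--         cnt = 0
--         for ch in s:
--             acc += int(ch)
--             cnt += 1
--             if cnt == i:
--                 parts.append(str(acc))
--                 acc = 0
--                 cnt = 0
--         if cnt:
--             parts.append(str(acc))
--         t = ''.join(parts)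
--         if len(t) <= i:
--             return int(t)
--         s = t
-- ===== Notes on version B (the rewrite author's own statement) =====
-- stated objective: alternative
-- what changed: Recursion plus a slicing comprehension (build all i-char substrings, then sum each) is replaced by an iterative while-loop whose pass is a single left-to-right scan with a running group sum and counter, flushing a part every i characters.
import Mathlib
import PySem

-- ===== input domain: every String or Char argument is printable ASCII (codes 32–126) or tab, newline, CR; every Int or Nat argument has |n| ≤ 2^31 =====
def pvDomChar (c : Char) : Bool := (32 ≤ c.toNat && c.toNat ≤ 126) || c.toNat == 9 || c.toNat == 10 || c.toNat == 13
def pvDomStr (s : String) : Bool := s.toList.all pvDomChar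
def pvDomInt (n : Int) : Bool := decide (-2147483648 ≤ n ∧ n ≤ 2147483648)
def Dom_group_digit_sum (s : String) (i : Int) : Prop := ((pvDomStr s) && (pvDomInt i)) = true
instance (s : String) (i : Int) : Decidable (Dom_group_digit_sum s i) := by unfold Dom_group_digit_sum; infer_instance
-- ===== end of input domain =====

-- B replaces A's recursion + slicing comprehension by an iterative while-loop whose pass is a
-- single scan with a running group sum and counter (objective: alternative decomposition).
-- Both ports carry a fuel argument solely as a totality guard for Lean; on every input admitted
-- by Pre_ the number of passes stays below the supplied fuel.

-- ===== PORT A =====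
-- int(d) for a 1-character string; Python raises ValueError on a non-digit — excluded by Pre_
def pvIntOfChar (d : Char) : Int := (PySem.Int.ofChars? [d]).getD 0

-- groups = [s[x:x+i] for x in range(0, len(s), i)]
def pvGroupsA (s : List Char) (i : Int) : List (List Char) :=
  (PySem.List.pyRange 0 s.length i).map (fun x => PySem.List.slice s (some x) (some (x + i)))

-- sums = ''  ;  for group in groups: sums += str(sum(int(d) for d in group))
def pvSumsA (s : List Char) (i : Int) : List Char :=
  (pvGroupsA s i).foldl
    (fun sums group => sums ++ PySem.Int.toChars ((group.map pvIntOfChar).sum)) []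

-- the recursion of A (fuel = totality guard only; int('') ValueError excluded by Pre_)
def pvRecA (fuel : Nat) (s : List Char) (i : Int) : Int :=
  match fuel with
  | 0 => 0
  | fuel + 1 =>
    let sums := pvSumsA s i
    if i < (sums.length : Int) then pvRecA fuel sums i
    else (PySem.Int.ofChars? sums).getD 0

def group_digit_sum (s : String) (i : Int) : Int :=
  pvRecA (2 * s.toList.length + 4) s.toList i

-- ===== PORT B =====
-- one step of B's scan: acc += int(ch); cnt += 1; if cnt == i: parts.append(str(acc)); acc = cnt = 0
def pvStepB (i : Int) (st : List (List Char) × Int × Int) (ch : Char) :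
    List (List Char) × Int × Int :=
  if st.2.2 + 1 = i then (st.1 ++ [PySem.Int.toChars (st.2.1 + pvIntOfChar ch)], 0, 0)
  else (st.1, st.2.1 + pvIntOfChar ch, st.2.2 + 1)

-- one pass of B: scan s; if cnt: parts.append(str(acc)); t = ''.join(parts)
def pvPassB (s : List Char) (i : Int) : List Char :=
  PySem.Chars.join []
    (if (s.foldl (pvStepB i) ([], 0, 0)).2.2 ≠ 0 then
        (s.foldl (pvStepB i) ([], 0, 0)).1 ++
          [PySem.Int.toChars (s.foldl (pvStepB i) ([], 0, 0)).2.1]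
      else (s.foldl (pvStepB i) ([], 0, 0)).1)

-- the while-True loop of B (fuel = totality guard only)
def pvLoopB (fuel : Nat) (s : List Char) (i : Int) : Int :=
  match fuel with
  | 0 => 0
  | fuel + 1 =>
    let t := pvPassB s i
    if (t.length : Int) ≤ i then (PySem.Int.ofChars? t).getD 0
    else pvLoopB fuel t i

def group_digit_sum_alt (s : String) (i : Int) : Int :=
  pvLoopB (2 * s.toList.length + 4) s.toList i

-- ===== PRECONDITION & SPEC =====
-- Pre_ admits exactly the inputs on which the Python A returns: i ≥ 1 and a nonempty all-digit
-- string, excluding i = 1 with more than one character (there A recurses forever on an unchanged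
-- string and dies with RecursionError; A also raises ValueError on '', on non-digit characters
-- and on i = 0, and RecursionError for i < 0).
def Pre_group_digit_sum (s : String) (i : Int) : Prop :=
  1 ≤ i ∧ s.toList ≠ [] ∧ PySem.Chars.strIsdigit s.toList = true ∧ (i = 1 → s.toList.length = 1)
instance (s : String) (i : Int) : Decidable (Pre_group_digit_sum s i) := by
  unfold Pre_group_digit_sum; infer_instance

def pvWitness_group_digit_sum : String × Int := ("46805", 3)

def Spec_group_digit_sum (s : String) (i : Int) (out : Int) : Prop := out = group_digit_sum_alt s i
instance (s : String) (i : Int) (out : Int) : Decidable (Spec_group_digit_sum s i out) := by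
  unfold Spec_group_digit_sum; infer_instance

-- ===== CLAIM (what is proved, stated in full; the proofs are below) =====
def Claim_equal_group_digit_sum : Prop :=
  ∀ (s : String) (i : Int), Dom_group_digit_sum s i → Pre_group_digit_sum s i →
    Spec_group_digit_sum s i (group_digit_sum s i)

-- ===== LEMMAS AND PROOFS =====

-- proof-only helper: the list of i-sized chunks of s
def pvChunks (s : List Char) (i : Int) : List (List Char) :=
  if s = [] ∨ i < 1 then []
  else s.take i.toNat :: pvChunks (s.drop i.toNat) i
termination_by s.length
decreasing_by
  rename_i h
  simp only [not_or, not_lt] at h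
  have h2 : s.length ≠ 0 := by simpa [List.length_eq_zero_iff] using h.1
  simp [List.length_drop]; omega

-- proof-only abbreviation: the digit-sum of a chunk
def pvDS (g : List Char) : Int := (g.map pvIntOfChar).sum

-- A's comprehension produces the head chunk and the comprehension of the rest
lemma pvGroupsA_cons (s : List Char) (i : Int) (hi : 1 ≤ i) (hs : s ≠ []) :
    pvGroupsA s i = s.take i.toNat :: pvGroupsA (s.drop i.toNat) i := by
  unfold pvGroupsA
  have hip : (0:Int) < i := by omega
  rw [PySem.List.pyRange_of_pos 0 _ hip, PySem.List.pyRange_of_pos 0 _ hip]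
  set t := i.toNat with ht
  have hit : i = (t:Int) := by omega
  have hn1 : 1 ≤ s.length := List.length_pos_of_ne_nil hs
  have hdiv : ∀ m : Nat, ((m:Int) - 0 + i - 1) / i = (((m + t - 1)/t : Nat) : Int) := by
    intro m
    rw [Int.natCast_div, hit]
    congr 1
    omega
  have hdivN : ∀ m : Nat, (((m:Int) - 0 + i - 1) / i).toNat = (m + t - 1)/t := by
    intro m; rw [hdiv]; exact Int.toNat_natCast _
  -- the count of groups
  have hm : (if (0:Int) < s.length then (((s.length:Int) - 0 + i - 1) / i).toNat else 0)
      = ((s.length + t - 1)/t : Nat) := by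
    rw [if_pos (by exact_mod_cast hn1)]
    exact hdivN _
  have hm' : (if (0:Int) < (s.drop t).length then ((((s.drop t).length:Int) - 0 + i - 1) / i).toNat else 0)
      = ((s.length + t - 1)/t : Nat) - 1 := by
    have ht1 : 1 ≤ t := by omega
    by_cases hle : s.length ≤ t
    · rw [if_neg (by simp [List.length_drop]; omega)]
      have h1 : (s.length + t - 1)/t = 1 := by
        apply Nat.div_eq_of_lt_le <;> omega
      rw [h1]
    · rw [if_pos (by simp [List.length_drop]; omega)]
      simp only [List.length_drop]
      rw [hdivN]
      have h2 : s.length + t - 1 = (s.length - t + t - 1) + t := by omega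
      rw [h2, Nat.add_div_right _ (by omega : 0 < t)]
      simp
  rw [hm, hm']
  have hmpos : 1 ≤ (s.length + t - 1)/t := by
    have h3 : 1 * t ≤ s.length + t - 1 := by omega
    exact (Nat.le_div_iff_mul_le (by omega)).2 h3
  obtain ⟨m', hm'eq⟩ : ∃ m', (s.length + t - 1)/t = m' + 1 :=
    ⟨_, (Nat.succ_pred_eq_of_pos hmpos).symm⟩
  rw [hm'eq]
  simp only [Nat.add_sub_cancel, List.range_succ_eq_map, List.map_cons, List.map_map]
  congr 1
  · -- head group is s[0:i]
    norm_num
    rw [PySem.List.slice_to s (by omega)]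
  · -- group x of the tail is group x+i of s
    apply List.map_congr_left
    intro k _
    simp only [Function.comp_apply, Nat.succ_eq_add_one]
    have ha : (0:Int) + i * ↑(k+1) = ((t*(k+1) : Nat) : Int) := by rw [hit]; push_cast; ring
    have hb : (0:Int) + i * ↑k = ((t*k : Nat) : Int) := by rw [hit]; push_cast; ring
    rw [ha, hb, hit]
    rw [show ((t*(k+1):Nat):Int) + (t:Int) = ((t*(k+1)+t : Nat):Int) by push_cast; ring,
        show ((t*k:Nat):Int) + (t:Int) = ((t*k+t : Nat):Int) by push_cast; ring]
    rw [PySem.List.slice_natCast, PySem.List.slice_natCast]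
    rw [List.drop_drop, Nat.mul_succ]
    congr 1
    · omega
    · congr 1
      omega

-- A's groups are the chunks
lemma pvGroupsA_eq_chunks (s : List Char) (i : Int) (hi : 1 ≤ i) :
    pvGroupsA s i = pvChunks s i := by
  induction hn : s.length using Nat.strong_induction_on generalizing s with
  | _ n ih =>
  by_cases hs : s = []
  · subst hs
    rw [pvChunks]
    simp [pvGroupsA, PySem.List.pyRange]
  · have hn1 : s.length ≠ 0 := by simpa [List.length_eq_zero_iff] using hs
    rw [pvGroupsA_cons s i hi hs, pvChunks, if_neg (not_or.mpr ⟨hs, by omega⟩)]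
    congr 1
    exact ih (s.drop i.toNat).length (by simp; omega) _ rfl

-- B's scan appends to parts only: an initial parts list is threaded through untouched
lemma pvFoldB_shift (i : Int) (s : List Char) (parts : List (List Char)) (a c : Int) :
    s.foldl (pvStepB i) (parts, a, c) =
      ((parts ++ (s.foldl (pvStepB i) ([], a, c)).1),
        (s.foldl (pvStepB i) ([], a, c)).2) := by
  induction s generalizing parts a c with
  | nil => simp
  | cons ch t ih =>
    simp only [List.foldl_cons, pvStepB]
    by_cases hc : c + 1 = i
    · simp only [if_pos hc, List.nil_append]
      rw [ih (parts ++ [PySem.Int.toChars (a + pvIntOfChar ch)]) 0 0,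
          ih [PySem.Int.toChars (a + pvIntOfChar ch)] 0 0]
      simp
    · simp only [if_neg hc]
      exact ih _ _ _

-- scanning fewer characters than the count missing to i never flushes
lemma pvFoldB_small (i : Int) (s : List Char) (parts : List (List Char)) (a c : Int)
    (h : c + s.length < i) :
    s.foldl (pvStepB i) (parts, a, c) = (parts, a + pvDS s, c + s.length) := by
  induction s generalizing parts a c with
  | nil => simp [pvDS]
  | cons ch t ih =>
    have hne : ¬ (c + 1 = i) := by simp at h; omega
    simp only [List.foldl_cons, pvStepB, if_neg hne]
    rw [ih _ _ _ (by simp at h ⊢; omega)]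
    simp only [pvDS, List.map_cons, List.sum_cons, List.length_cons]
    rw [Prod.mk.injEq, Prod.mk.injEq]
    refine ⟨rfl, by ring, by push_cast; ring⟩

-- scanning one full chunk flushes exactly once
lemma pvFoldB_chunk (i : Int) (s : List Char) (parts : List (List Char))
    (hi : 1 ≤ i) (hlen : s.length = i.toNat) :
    s.foldl (pvStepB i) (parts, 0, 0) = (parts ++ [PySem.Int.toChars (pvDS s)], 0, 0) := by
  induction s using List.reverseRecOn with
  | nil => simp at hlen; omega
  | append_singleton t x _ =>
    rw [List.foldl_append]
    have hlt : (0:Int) + t.length < i := by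
      simp at hlen; omega
    rw [pvFoldB_small i t parts 0 0 hlt]
    simp only [List.foldl_cons, List.foldl_nil, pvStepB]
    have hc : (0:Int) + t.length + 1 = i := by
      simp at hlen; omega
    rw [if_pos hc]
    simp [pvDS]

-- B's parts after one pass are the digit-sum strings of the chunks
lemma pvPartsB_eq (s : List Char) (i : Int) (hi : 1 ≤ i) :
    (if (s.foldl (pvStepB i) ([], 0, 0)).2.2 ≠ 0 then
        (s.foldl (pvStepB i) ([], 0, 0)).1 ++
          [PySem.Int.toChars (s.foldl (pvStepB i) ([], 0, 0)).2.1]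
      else (s.foldl (pvStepB i) ([], 0, 0)).1) =
      (pvChunks s i).map (fun g => PySem.Int.toChars (pvDS g)) := by
  induction hn : s.length using Nat.strong_induction_on generalizing s with
  | _ n ih =>
  by_cases hs : s = []
  · subst hs
    rw [pvChunks]
    simp
  · have hn1 : s.length ≠ 0 := by simpa [List.length_eq_zero_iff] using hs
    rw [pvChunks, if_neg (not_or.mpr ⟨hs, by omega⟩)]
    by_cases hlt : s.length < i.toNat
    · -- one short final group
      rw [pvFoldB_small i s [] 0 0 (by omega)]
      simp only [zero_add, ne_eq]
      rw [if_pos (by exact_mod_cast hn1)]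
      rw [List.drop_eq_nil_of_le (by omega), List.take_of_length_le (by omega)]
      rw [pvChunks]
      simp
    · -- a full chunk, then the rest of the scan
      have hfold : s.foldl (pvStepB i) ([], 0, 0)
          = (s.drop i.toNat).foldl (pvStepB i)
              ([PySem.Int.toChars (pvDS (s.take i.toNat))], 0, 0) := by
        conv_lhs => rw [← List.take_append_drop i.toNat s]
        rw [List.foldl_append,
            pvFoldB_chunk i (s.take i.toNat) [] hi (by simp; omega)]
        simp
      rw [hfold, pvFoldB_shift i (s.drop i.toNat) _ 0 0]
      have ihr := ih (s.drop i.toNat).length (by simp; omega) (s.drop i.toNat) rfl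
      simp only [List.map_cons, ne_eq]
      rw [← ihr]
      by_cases hz : ((s.drop i.toNat).foldl (pvStepB i) ([], 0, 0)).2.2 = 0
      · rw [if_neg (by simpa using hz), if_neg (by simpa using hz)]
        simp
      · rw [if_pos hz, if_pos hz]
        simp

-- ''.join is concatenation
lemma pvJoin_nil_flatten (l : List (List Char)) : PySem.Chars.join [] l = l.flatten := by
  induction l with
  | nil => simp [PySem.Chars.join_nil]
  | cons p rest ih =>
    cases rest with
    | nil => simp [PySem.Chars.join_singleton]
    | cons q r => rw [PySem.Chars.join_cons_cons]; simp [ih]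

-- the two passes produce the same string
lemma pvPass_eq (s : List Char) (i : Int) (hi : 1 ≤ i) : pvPassB s i = pvSumsA s i := by
  unfold pvPassB pvSumsA
  rw [pvPartsB_eq s i hi, pvJoin_nil_flatten, pvGroupsA_eq_chunks s i hi,
    PySem.List.foldl_append_eq_flatMap]
  simp [List.flatMap_def, pvDS]

-- loop and recursion coincide, fuel for fuel
lemma pvRec_eq_loop (fuel : Nat) (s : List Char) (i : Int) (hi : 1 ≤ i) :
    pvRecA fuel s i = pvLoopB fuel s i := by
  induction fuel generalizing s with
  | zero => rfl
  | succ f ih =>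
    simp only [pvRecA, pvLoopB, pvPass_eq s i hi]
    by_cases h : i < ((pvSumsA s i).length : Int)
    · rw [if_pos h, if_neg (by omega), ih _]
    · rw [if_neg h, if_pos (by omega)]

-- ===== VERDICT (by name: the statement is the Claim_ definition above) =====
theorem group_digit_sum_spec : Claim_equal_group_digit_sum := by
  intro s i _ hpre
  unfold Spec_group_digit_sum group_digit_sum group_digit_sum_alt
  exact pvRec_eq_loop _ _ _ hpre.1
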